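-- pv_equiv track=rewrite | github.com/pypi-data/pypi-mirror-97 | packages/GridCal/GridCal-4.0.0a14.tar.gz/GridCal-4.0.0a14/GridCal/Engine/IO/cim_parser.py | sort_cim_files
-- ===== SOURCE A (Python) =====
-- def sort_cim_files(file_names):
--     """
--     Sorts the CIM files in the preferred reading order
--     :param file_names: lis of file names
--     :return: sorted list of file names
--     """
--     # sort the files
--     lst = list()
--     nn = len(file_names)
--     for i in range(nn - 1, -1, -1):
--         f = file_names[i]
--         if 'TP' in f or 'TPDB' in f:
--             lst.append(file_names.pop(i))
--
--     nn = len(file_names)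
--     for i in range(nn - 1, -1, -1):
--         f = file_names[i]
--         if 'EQBD' in f:
--             lst.append(file_names.pop(i))
--
--     lst2 = lst + file_names
--
--     return lst2
-- ===== SOURCE B (Python) =====
-- def sort_cim_files(file_names):
--     """
--     Sorts the CIM files in the preferred reading order
--     :param file_names: lis of file names
--     :return: sorted list of file names
--     """
--     tp = []
--     eqbd = []
--     rest = []
--     for f in file_names:
--         if 'TP' in f:
--             tp.append(f)
--         elif 'EQBD' in f:
--             eqbd.append(f)
--         else:
--             rest.append(f)
--     return tp[::-1] + eqbd[::-1] + rest
-- ===== Notes on version B (the rewrite author's own statement) =====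
-- stated objective: alternative
-- what changed: Replaces the two reverse-index scans that delete matching elements with pop(i) by a single forward pass bucketing names into TP/EQBD/other lists, then reversing the first two buckets and concatenating; B also does not mutate the input list.
import Mathlib
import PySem

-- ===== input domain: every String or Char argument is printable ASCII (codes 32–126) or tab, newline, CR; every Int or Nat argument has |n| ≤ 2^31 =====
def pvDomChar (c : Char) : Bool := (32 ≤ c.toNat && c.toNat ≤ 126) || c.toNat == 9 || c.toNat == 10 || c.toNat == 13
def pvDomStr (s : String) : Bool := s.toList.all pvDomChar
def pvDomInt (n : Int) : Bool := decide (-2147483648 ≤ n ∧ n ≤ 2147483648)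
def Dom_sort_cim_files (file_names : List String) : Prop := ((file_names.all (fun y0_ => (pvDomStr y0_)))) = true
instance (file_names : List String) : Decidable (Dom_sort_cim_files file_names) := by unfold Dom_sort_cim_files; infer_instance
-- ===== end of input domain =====

-- B replaces A's two reverse index scans with pop(i) deletions by one forward bucketing pass
-- (A mutates its argument in place; B does not -- the claim is about the return value only).

-- ===== PORT A =====
-- one iteration of A's 'for i in range(nn-1,-1,-1): f = file_names[i]; if cond(f): lst.append(file_names.pop(i))'
def pvALoop (cond : String → Bool) (st : List String × List String) (i : Int) :
    List String × List String :=
  match PySem.List.pyGet? st.2 i with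
  | none => st          -- unreachable: every index the range produces is in range
  | some f =>
    if cond f then
      match PySem.List.pop? st.2 i with
      | none => st      -- unreachable likewise
      | some (v, rest) => (st.1 ++ [v], rest)
    else st

def sort_cim_files (file_names : List String) : List String :=
  let nn : Int := file_names.length
  let st1 := (PySem.List.pyRange (nn - 1) (-1) (-1)).foldl
      (pvALoop (fun f => PySem.Str.isIn "TP" f || PySem.Str.isIn "TPDB" f)) ([], file_names)
  let nn2 : Int := st1.2.length
  let st2 := (PySem.List.pyRange (nn2 - 1) (-1) (-1)).foldl
      (pvALoop (fun f => PySem.Str.isIn "EQBD" f)) st1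
  st2.1 ++ st2.2

-- ===== PORT B =====
-- one iteration of B's bucketing loop: append f to the TP, EQBD or other bucket
def pvBStep (st : List String × List String × List String) (f : String) :
    List String × List String × List String :=
  if PySem.Str.isIn "TP" f then (st.1 ++ [f], st.2.1, st.2.2)
  else if PySem.Str.isIn "EQBD" f then (st.1, st.2.1 ++ [f], st.2.2)
  else (st.1, st.2.1, st.2.2 ++ [f])

def sort_cim_files_alt (file_names : List String) : List String :=
  let st := file_names.foldl pvBStep ([], [], [])
  st.1.reverse ++ st.2.1.reverse ++ st.2.2

-- ===== PRECONDITION & SPEC =====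
def Spec_sort_cim_files (file_names : List String) (out : List String) : Prop := out = sort_cim_files_alt file_names
instance (file_names : List String) (out : List String) : Decidable (Spec_sort_cim_files file_names out) := by unfold Spec_sort_cim_files; infer_instance

-- ===== CLAIM (what is proved, stated in full; the proofs are below) =====
def Claim_equal_sort_cim_files : Prop := ∀ (file_names : List String), Dom_sort_cim_files file_names → Spec_sort_cim_files file_names (sort_cim_files file_names)

-- ===== LEMMAS AND PROOFS =====

lemma erase_mid (l suf : List String) (x : String) :
    (l ++ x :: suf).eraseIdx l.length = l ++ suf := by
  induction l with
  | nil => simp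
  | cons a t ih => simp [ih]

lemma condA_eq (f : String) :
    (PySem.Str.isIn "TP" f || PySem.Str.isIn "TPDB" f) = PySem.Str.isIn "TP" f := by
  cases h : PySem.Str.isIn "TP" f with
  | true => simp
  | false =>
    simp only [Bool.false_or]
    rw [PySem.Str.isIn_eq] at h ⊢
    rw [PySem.Chars.isIn_eq_false_iff] at h
    rw [PySem.Chars.isIn_eq_false_iff]
    intro hin
    exact h (List.IsInfix.trans (by decide) hin)

-- A's reverse-index-pop loop, characterised: it moves the cond-matching elements of mid (reversed)
-- onto acc and leaves the rest (and an untouched prefix/suffix) in place.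
lemma pvALoop_all (cond : String → Bool) (mid : List String) :
    ∀ (acc pre suf : List String),
    (PySem.List.pyRange (((pre.length : Int) + mid.length) - 1) ((pre.length : Int) - 1) (-1)).foldl
      (pvALoop cond) (acc, pre ++ (mid ++ suf))
    = (acc ++ (mid.filter cond).reverse, pre ++ (mid.filter (fun f => !cond f) ++ suf)) := by
  induction mid using List.reverseRecOn with
  | nil => intro acc pre suf; rw [PySem.List.pyRange_neg_one_eq_nil (by simp)]; simp
  | append_singleton ys x ih =>
    intro acc pre suf
    have hlen : ((pre.length : Int) + (ys ++ [x]).length) - 1 = ((pre ++ ys).length : Int) := by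
      simp only [List.length_append, List.length_cons, List.length_nil]; push_cast; ring
    rw [hlen, PySem.List.pyRange_neg_one_cons (by simp only [List.length_append]; omega)]
    have hassoc : pre ++ ((ys ++ [x]) ++ suf) = (pre ++ ys) ++ (x :: suf) := by simp
    have hget : PySem.List.pyGet? (pre ++ ((ys ++ [x]) ++ suf)) ((pre ++ ys).length : Int)
        = some x := by rw [hassoc]; exact PySem.List.pyGet?_append_length _ _ _
    simp only [List.foldl_cons]
    cases hc : cond x with
    | true =>
      have hpop : PySem.List.pop? (pre ++ ((ys ++ [x]) ++ suf)) ((pre ++ ys).length : Int)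
          = some (x, (pre ++ ys) ++ suf) := by
        rw [hassoc, PySem.List.pop?_natCast _ _ (by simp)]
        congr 1
        rw [Prod.mk.injEq]
        refine ⟨?_, erase_mid _ _ _⟩
        simp [List.getElem_append_right]
      have hstep : pvALoop cond (acc, pre ++ ((ys ++ [x]) ++ suf)) ((pre ++ ys).length : Int)
          = (acc ++ [x], pre ++ (ys ++ suf)) := by
        simp only [pvALoop, hget, hc, if_true, hpop]
        simp
      rw [hstep]
      have hr : ((pre ++ ys).length : Int) - 1 = ((pre.length : Int) + ys.length) - 1 := by
        simp
      rw [hr, ih (acc ++ [x]) pre suf]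
      simp [List.filter_append, hc]
    | false =>
      have hstep : pvALoop cond (acc, pre ++ ((ys ++ [x]) ++ suf)) ((pre ++ ys).length : Int)
          = (acc, pre ++ (ys ++ (x :: suf))) := by
        simp only [pvALoop, hget, hc]
        simp
      rw [hstep]
      have hr : ((pre ++ ys).length : Int) - 1 = ((pre.length : Int) + ys.length) - 1 := by
        simp
      rw [hr, ih acc pre (x :: suf)]
      simp [List.filter_append, hc]

-- B's single pass, characterised as three filters.
lemma pvB_all (fs : List String) : ∀ t e r : List String,
    fs.foldl pvBStep (t, e, r) =
      (t ++ fs.filter (fun f => PySem.Str.isIn "TP" f),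
       e ++ fs.filter (fun f => PySem.Str.isIn "EQBD" f && !PySem.Str.isIn "TP" f),
       r ++ fs.filter (fun f => !PySem.Str.isIn "EQBD" f && !PySem.Str.isIn "TP" f)) := by
  induction fs with
  | nil => simp
  | cons f fs ih =>
    intro t e r
    simp only [List.foldl_cons, pvBStep]
    cases h1 : PySem.Str.isIn "TP" f with
    | true =>
      rw [if_pos rfl]; rw [ih]
      simp at h1
      simp [h1]
    | false =>
      rw [if_neg (by simp)]
      cases h2 : PySem.Str.isIn "EQBD" f with
      | true =>
        rw [if_pos rfl]; rw [ih]
        simp at h1 h2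
        simp [h1, h2]
      | false =>
        rw [if_neg (by simp)]; rw [ih]
        simp at h1 h2
        simp [h1, h2]

theorem pv_main (fs : List String) : sort_cim_files fs = sort_cim_files_alt fs := by
  simp only [sort_cim_files, sort_cim_files_alt]
  have h1 := pvALoop_all (fun f => PySem.Str.isIn "TP" f || PySem.Str.isIn "TPDB" f) fs [] [] []
  simp only [List.length_nil, Nat.cast_zero, zero_add, zero_sub, List.nil_append,
    List.append_nil] at h1
  rw [h1]
  have h2 := pvALoop_all (fun f => PySem.Str.isIn "EQBD" f)
      (fs.filter (fun f => !(PySem.Str.isIn "TP" f || PySem.Str.isIn "TPDB" f)))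
      ((fs.filter (fun f => PySem.Str.isIn "TP" f || PySem.Str.isIn "TPDB" f)).reverse) [] []
  simp only [List.length_nil, Nat.cast_zero, zero_add, zero_sub, List.nil_append,
    List.append_nil] at h2
  rw [h2]
  rw [pvB_all]
  simp only [List.nil_append]
  have hc1 : fs.filter (fun f => PySem.Str.isIn "TP" f || PySem.Str.isIn "TPDB" f)
      = fs.filter (fun f => PySem.Str.isIn "TP" f) :=
    List.filter_congr (fun x _ => condA_eq x)
  have hc1' : fs.filter (fun f => !(PySem.Str.isIn "TP" f || PySem.Str.isIn "TPDB" f))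
      = fs.filter (fun f => !PySem.Str.isIn "TP" f) :=
    List.filter_congr (fun x _ => by rw [condA_eq])
  rw [hc1, hc1', List.filter_filter, List.filter_filter]

-- ===== VERDICT (by name: the statement is the Claim_ definition above) =====
theorem sort_cim_files_spec : Claim_equal_sort_cim_files := by
  intro fs _
  unfold Spec_sort_cim_files
  exact pv_main fs
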